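-- pv_equiv track=rewrite | github.com/mmartrou/mol2lewis | mol2lewis/geometry.py | _choose_max_spaced_candidates
-- ===== SOURCE A (Python) =====
-- def _norm_deg(a):
--     """Normalize angle to [0, 360) range."""
--     return (a + 360) % 360
--
-- def _min_angular_distance(deg, others):
--     """Return minimal cyclic angular distance between deg and any in others."""
--     if not others:
--         return 180
--     dists = [min(abs(_norm_deg(deg - o)), 360 - abs(_norm_deg(deg - o))) for o in others]
--     return min(dists)
--
-- def _choose_max_spaced_candidates(required, candidates, occupied):
--     """
--     Choose `required` candidate angles from `candidates` so that the minimum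
--     angular distance to `occupied` angles + already chosen ones is maximized.
--     Uses greedy selection.
--     """
--     chosen = []
--     avail = [c for c in candidates if c not in occupied]
--     for _ in range(required):
--         best = None
--         best_min = -1
--         for c in avail:
--             others = occupied + chosen
--             m = _min_angular_distance(c, others)
--             if m > best_min:
--                 best_min = m
--                 best = c
--         if best is None:
--             break
--         chosen.append(best)
--         avail.remove(best)
--     return chosen
-- ===== SOURCE B (Python) =====
-- def _choose_max_spaced_candidates(required, candidates, occupied):
--     """Greedy max-spaced selection with cached min-distances updated incrementally."""
--     def dist(a, b):
--         x = (a - b) % 360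
--         return min(x, 360 - x)
--     cached = [(c, min((dist(c, o) for o in occupied), default=180))
--               for c in candidates if c not in occupied]
--     chosen = []
--     while len(chosen) < required and cached:
--         best, bm = cached[0]
--         for c, m in cached[1:]:
--             if m > bm:
--                 best, bm = c, m
--         chosen.append(best)
--         cached.remove((best, bm))
--         cached = [(c, min(m, dist(c, best))) for c, m in cached]
--     return chosen
-- ===== Notes on version B (the rewrite author's own statement) =====
-- stated objective: faster
-- what changed: Instead of recomputing each candidate's minimum angular distance to occupied+chosen from scratch every round, B caches one min-distance per candidate and updates it incrementally against only the newly chosen angle.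
import Mathlib
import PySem

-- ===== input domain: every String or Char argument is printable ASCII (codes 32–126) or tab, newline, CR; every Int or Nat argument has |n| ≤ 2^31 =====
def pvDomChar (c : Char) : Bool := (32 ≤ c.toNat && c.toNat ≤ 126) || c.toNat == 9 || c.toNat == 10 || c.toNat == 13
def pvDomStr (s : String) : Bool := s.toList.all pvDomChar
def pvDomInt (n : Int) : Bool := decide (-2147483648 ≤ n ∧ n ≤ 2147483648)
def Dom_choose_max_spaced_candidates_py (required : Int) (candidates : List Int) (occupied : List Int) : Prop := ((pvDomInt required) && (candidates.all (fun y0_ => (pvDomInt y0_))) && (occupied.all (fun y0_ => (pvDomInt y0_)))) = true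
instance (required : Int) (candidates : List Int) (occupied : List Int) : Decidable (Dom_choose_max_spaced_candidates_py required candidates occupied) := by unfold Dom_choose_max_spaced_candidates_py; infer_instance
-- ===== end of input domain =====

-- B replaces A's per-round recomputation of every candidate's min distance by a cached
-- min-distance per candidate, updated incrementally against only the newly chosen angle (faster).

-- ===== PORT A =====
-- _norm_deg(a) = (a + 360) % 360  (Python %)
def pyNormDeg (a : Int) : Int := PySem.Int.mod (a + 360) 360

-- _min_angular_distance(deg, others); Python min over a nonempty list = foldl min
def pyMinAngularDistance (deg : Int) (others : List Int) : Int :=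
  if others = [] then 180
  else
    let dists := others.map (fun o =>
      min |pyNormDeg (deg - o)| (360 - |pyNormDeg (deg - o)|))
    match dists with
    | [] => 180  -- unreachable (others ≠ [])
    | d :: ds => ds.foldl min d

-- the `for _ in range(required)` loop of A; `avail.remove(best)` cannot fail since best ∈ avail,
-- ported as remove? with getD
def chooseLoopA (occupied : List Int) : Nat → List Int → List Int → List Int
  | 0, _avail, chosen => chosen
  | n + 1, avail, chosen =>
      let sel := avail.foldl (fun (st : Option Int × Int) c =>
          let m := pyMinAngularDistance c (occupied ++ chosen)
          if st.2 < m then (some c, m) else st) (none, -1)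
      match sel.1 with
      | none => chosen
      | some b => chooseLoopA occupied n ((PySem.List.remove? avail b).getD avail) (chosen ++ [b])

def choose_max_spaced_candidates_py (required : Int) (candidates : List Int) (occupied : List Int) : List Int :=
  chooseLoopA occupied required.toNat (candidates.filter (fun c => !(occupied.contains c))) []

-- ===== PORT B =====
-- dist(a, b) of Source B
def altDist (a b : Int) : Int :=
  let x := PySem.Int.mod (a - b) 360
  min x (360 - x)

-- min((dist(c, o) for o in occupied), default=180)
def altInit (occupied : List Int) (c : Int) : Int :=
  match occupied.map (fun o => altDist c o) with
  | [] => 180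
  | d :: ds => ds.foldl min d

-- the while loop of B: each iteration appends one element, so it runs until the countdown
-- (required, as a Nat) or the cache is exhausted; cached.remove((best, bm)) cannot fail
def chooseLoopB : Nat → List (Int × Int) → List Int → List Int
  | 0, _cached, chosen => chosen
  | n + 1, cached, chosen =>
      match cached with
      | [] => chosen
      | p :: ps =>
          let sel := ps.foldl (fun (b q : Int × Int) => if b.2 < q.2 then q else b) p
          let rest := (PySem.List.remove? cached sel).getD cached
          chooseLoopB n (rest.map (fun q => (q.1, min q.2 (altDist q.1 sel.1)))) (chosen ++ [sel.1])

def choose_max_spaced_candidates_py_alt (required : Int) (candidates : List Int) (occupied : List Int) : List Int :=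
  let cached := (candidates.filter (fun c => !(occupied.contains c))).map (fun c => (c, altInit occupied c))
  chooseLoopB required.toNat cached []

-- ===== PRECONDITION & SPEC =====
def Spec_choose_max_spaced_candidates_py (required : Int) (candidates : List Int) (occupied : List Int) (out : List Int) : Prop := out = choose_max_spaced_candidates_py_alt required candidates occupied
instance (required : Int) (candidates : List Int) (occupied : List Int) (out : List Int) : Decidable (Spec_choose_max_spaced_candidates_py required candidates occupied out) := by unfold Spec_choose_max_spaced_candidates_py; infer_instance

-- ===== CLAIM (what is proved, stated in full; the proofs are below) =====
def Claim_equal_choose_max_spaced_candidates_py : Prop := ∀ (required : Int) (candidates : List Int) (occupied : List Int), Dom_choose_max_spaced_candidates_py required candidates occupied → Spec_choose_max_spaced_candidates_py required candidates occupied (choose_max_spaced_candidates_py required candidates occupied)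

-- ===== LEMMAS AND PROOFS =====

-- the per-element distance value in A equals B's dist: the abs is redundant (mod 360 ≥ 0)
-- and (x + 360) % 360 = x % 360
lemma distval_eq (deg o : Int) :
    min |pyNormDeg (deg - o)| (360 - |pyNormDeg (deg - o)|) = altDist deg o := by
  have h360 : (0:Int) < 360 := by norm_num
  have hper : PySem.Int.mod (deg - o + 360) 360 = PySem.Int.mod (deg - o) 360 := by
    rw [PySem.Int.mod_eq_emod_of_pos h360, PySem.Int.mod_eq_emod_of_pos h360]; omega
  have hnn : 0 ≤ PySem.Int.mod (deg - o) 360 := PySem.Int.mod_nonneg _ h360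
  simp only [pyNormDeg, altDist, hper, abs_of_nonneg hnn]

-- A's min_angular_distance equals B's cached initial value
lemma minAngular_eq_altInit (occupied : List Int) (c : Int) :
    pyMinAngularDistance c occupied = altInit occupied c := by
  unfold pyMinAngularDistance altInit
  cases occupied with
  | nil => simp
  | cons a l =>
      simp only [List.map_cons]
      have : ∀ o, min |pyNormDeg (c - o)| (360 - |pyNormDeg (c - o)|) = altDist c o :=
        fun o => distval_eq c o
      simp [this]

-- nonnegativity of the distance values and of their running minimum
lemma distval_nonneg (a b : Int) : 0 ≤ altDist a b := by
  have h360 : (0:Int) < 360 := by norm_num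
  have h1 := PySem.Int.mod_nonneg (a - b) h360
  have h2 := PySem.Int.mod_lt (a - b) h360
  unfold altDist
  simp only [le_min_iff]
  omega

lemma foldl_min_nonneg (d : Int) (l : List Int) (hd : 0 ≤ d) (hl : ∀ x ∈ l, 0 ≤ x) :
    0 ≤ l.foldl min d := by
  induction l generalizing d with
  | nil => exact hd
  | cons a t ih =>
      exact ih _ (le_min hd (hl a (by simp))) (fun x hx => hl x (by simp [hx]))

lemma minAngular_nonneg (deg : Int) (others : List Int) :
    0 ≤ pyMinAngularDistance deg others := by
  unfold pyMinAngularDistance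
  cases others with
  | nil => simp
  | cons a l =>
      simp only [List.map_cons]
      refine foldl_min_nonneg _ _ (by rw [distval_eq]; exact distval_nonneg _ _) ?_
      intro x hx
      simp only [List.mem_map] at hx
      obtain ⟨o, _, rfl⟩ := hx
      rw [distval_eq]; exact distval_nonneg _ _

-- appending one more "other" takes the min with its distance
lemma minAngular_append (deg b : Int) (l : List Int) :
    pyMinAngularDistance deg (l ++ [b]) =
      min (pyMinAngularDistance deg l) (altDist deg b) := by
  unfold pyMinAngularDistance
  cases l with
  | nil =>
      simp only [List.nil_append]
      have hle : altDist deg b ≤ 180 := by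
        have h360 : (0:Int) < 360 := by norm_num
        have h1 := PySem.Int.mod_nonneg (deg - b) h360
        unfold altDist
        simp only [min_le_iff]
        omega
      simp [distval_eq, min_eq_right hle]
  | cons a t =>
      simp only [List.cons_append, List.map_cons, List.map_append, List.map_nil]
      rw [List.foldl_append]
      simp [distval_eq]

-- A's best-candidate fold, started after its first forced update, mirrors B's fold over the cache
lemma fold_sel_eq (g : Int → Int × Int) (hg : ∀ c, (g c).1 = c)
    (l : List Int) (p : Int × Int) :
    l.foldl (fun (st : Option Int × Int) c =>
        if st.2 < (g c).2 then (some c, (g c).2) else st) (some p.1, p.2) =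
      ((some ((l.map g).foldl (fun b q => if b.2 < q.2 then q else b) p).1),
        ((l.map g).foldl (fun b q => if b.2 < q.2 then q else b) p).2) := by
  induction l generalizing p with
  | nil => simp
  | cons a t ih =>
      simp only [List.foldl_cons, List.map_cons]
      by_cases h : p.2 < (g a).2
      · simp only [h, reduceIte]
        have := ih (g a)
        rw [hg a] at this
        exact this
      · simp only [h, reduceIte]
        exact ih p

-- removing (by value) commutes with mapping an injective-on-keys tagging function
lemma remove_map (g : Int → Int × Int) (hg : ∀ c, (g c).1 = c) (v : Int) (l : List Int) :
    PySem.List.remove? (l.map g) (g v) = (PySem.List.remove? l v).map (List.map g) := by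
  induction l with
  | nil => simp [PySem.List.remove?]
  | cons a t ih =>
      by_cases h : a = v
      · subst h; simp [PySem.List.remove?_cons_self]
      · have hga : g a ≠ g v := by
          intro he; exact h (by rw [← hg a, ← hg v, he])
        rw [List.map_cons, PySem.List.remove?_cons_of_ne (t.map g) hga, PySem.List.remove?_cons_of_ne t h, ih]
        cases PySem.List.remove? t v <;> simp

-- the selected pair is an element of the cache, hence carries its key's cached value
lemma fold_sel_mem (l : List (Int × Int)) (p : Int × Int) :
    l.foldl (fun (b q : Int × Int) => if b.2 < q.2 then q else b) p ∈ p :: l := by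
  induction l generalizing p with
  | nil => simp
  | cons a t ih =>
      simp only [List.foldl_cons]
      by_cases h : p.2 < a.2
      · simp only [h, reduceIte]
        rcases List.mem_cons.mp (ih a) with h' | h'
        · simp [h']
        · simp [h']
      · simp only [h, reduceIte]
        rcases List.mem_cons.mp (ih p) with h' | h'
        · simp [h']
        · simp [h']

-- A's fold including its forced first update (-1 < every distance) equals B's head-seeded fold
lemma fold_sel_eq0 (g : Int → Int × Int) (hg : ∀ c, (g c).1 = c)
    (hnn : ∀ c, 0 ≤ (g c).2) (a : Int) (t : List Int) :
    (a :: t).foldl (fun (st : Option Int × Int) c =>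
        if st.2 < (g c).2 then (some c, (g c).2) else st) ((none : Option Int), (-1 : Int)) =
      ((some (((t.map g).foldl (fun (b q : Int × Int) => if b.2 < q.2 then q else b) (g a)).1)),
        (((t.map g).foldl (fun (b q : Int × Int) => if b.2 < q.2 then q else b) (g a)).2)) := by
  have h1 : (if ((none : Option Int), (-1 : Int)).2 < (g a).2
        then ((some a : Option Int), (g a).2) else ((none : Option Int), (-1 : Int)))
      = (some ((g a).1), (g a).2) := by
    rw [if_pos (by have := hnn a; omega), hg]
  rw [List.foldl_cons, h1, fold_sel_eq g hg t (g a)]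

-- main loop invariant: B's cache is exactly A's per-candidate min distance to occupied ++ chosen
lemma loop_eq (occupied : List Int) (n : Nat) (avail chosen : List Int) :
    chooseLoopA occupied n avail chosen =
      chooseLoopB n (avail.map (fun c => (c, pyMinAngularDistance c (occupied ++ chosen)))) chosen := by
  induction n generalizing avail chosen with
  | zero => simp [chooseLoopA, chooseLoopB]
  | succ n ih =>
      set g : Int → Int × Int := fun c => (c, pyMinAngularDistance c (occupied ++ chosen)) with hgdef
      have hg : ∀ c, (g c).1 = c := fun c => rfl
      have hnn : ∀ c, 0 ≤ (g c).2 := fun c => minAngular_nonneg c (occupied ++ chosen)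
      cases avail with
      | nil => simp [chooseLoopA, chooseLoopB]
      | cons a t =>
          have hstep :
              (fun (st : Option Int × Int) c =>
                let m := pyMinAngularDistance c (occupied ++ chosen)
                if st.2 < m then (some c, m) else st) =
              (fun (st : Option Int × Int) c =>
                if st.2 < (g c).2 then (some c, (g c).2) else st) := rfl
          set S := (t.map g).foldl (fun (b q : Int × Int) => if b.2 < q.2 then q else b) (g a) with hSdef
          have hA : chooseLoopA occupied (n + 1) (a :: t) chosen =
              chooseLoopA occupied n ((PySem.List.remove? (a :: t) S.1).getD (a :: t)) (chosen ++ [S.1]) := by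
            conv_lhs => rw [chooseLoopA, hstep, fold_sel_eq0 g hg hnn a t]
          have hB : chooseLoopB (n + 1) ((a :: t).map g) chosen =
              chooseLoopB n (((PySem.List.remove? ((a :: t).map g) S).getD ((a :: t).map g)).map
                (fun q => (q.1, min q.2 (altDist q.1 S.1)))) (chosen ++ [S.1]) := by
            conv_lhs => rw [List.map_cons, chooseLoopB]
            rfl
          rw [hA, hB, ih]
          congr 1
          -- sel is g of its own key
          have hmem : S ∈ g a :: t.map g := hSdef ▸ fold_sel_mem (t.map g) (g a)
          have hsel_g : S = g S.1 := by
            rcases List.mem_cons.mp hmem with h | h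
            · rw [h, hg]
            · obtain ⟨c, -, hgc⟩ := List.mem_map.mp h
              rw [← hgc, hg]
          -- removal commutes with g
          have hrem : (PySem.List.remove? ((a :: t).map g) S).getD ((a :: t).map g) =
              ((PySem.List.remove? (a :: t) S.1).getD (a :: t)).map g := by
            rw [hsel_g, remove_map g hg]
            cases PySem.List.remove? (a :: t) S.1 <;> simp
          rw [hrem, List.map_map]
          apply List.map_congr_left
          intro c _
          simp only [Function.comp_apply, hgdef]
          rw [← List.append_assoc, minAngular_append]

-- ===== VERDICT (by name: the statement is the Claim_ definition above) =====
theorem choose_max_spaced_candidates_py_spec : Claim_equal_choose_max_spaced_candidates_py := by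
  intro required candidates occupied _
  show choose_max_spaced_candidates_py required candidates occupied =
    choose_max_spaced_candidates_py_alt required candidates occupied
  unfold choose_max_spaced_candidates_py choose_max_spaced_candidates_py_alt
  rw [loop_eq]
  congr 1
  apply List.map_congr_left
  intro c _
  simp [minAngular_eq_altInit]
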